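-- pv_equiv track=rewrite | github.com/ym1522/Algorithm-study | 황순규/스터디/문제풀이1/8892_bj.py | Felindrom
-- ===== SOURCE A (Python) =====
-- def Felindrom(s1, s2):
--     temp = s1 + s2
--     flag = True
--     for i in range(len(temp) // 2):
--         if temp[i] != temp[-i-1]:
--             flag = False
--             break
--     return flag
-- ===== SOURCE B (Python) =====
-- def Felindrom(s1, s2):
--     t = s1 + s2
--     return t == t[::-1]
-- ===== Notes on version B (the rewrite author's own statement) =====
-- stated objective: idiomatic
-- what changed: Replaces the mirrored-index half-loop with an early break and a flag by building the concatenation once and comparing it to its full reversal.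
import Mathlib
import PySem

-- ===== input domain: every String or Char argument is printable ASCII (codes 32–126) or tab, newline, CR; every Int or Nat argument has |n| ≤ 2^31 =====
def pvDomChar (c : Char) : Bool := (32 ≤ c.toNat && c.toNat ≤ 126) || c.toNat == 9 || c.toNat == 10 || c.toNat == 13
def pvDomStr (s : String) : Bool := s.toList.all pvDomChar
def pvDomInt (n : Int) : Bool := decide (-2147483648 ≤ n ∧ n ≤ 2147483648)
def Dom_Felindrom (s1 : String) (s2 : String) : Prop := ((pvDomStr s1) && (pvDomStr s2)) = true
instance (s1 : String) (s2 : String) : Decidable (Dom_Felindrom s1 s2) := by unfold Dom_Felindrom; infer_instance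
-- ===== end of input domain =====

-- B replaces A's mirrored-index half-loop (with flag and early break) by one full-reversal equality test; idiomatic, same values everywhere.

-- ===== PORT A =====
-- the 'for i in range(len(temp)//2)' loop with the early break, as structural recursion on the index
def FelLoop (t : List Char) (i : Nat) : Bool :=
  if h : i < t.length / 2 then
    if PySem.List.pyGetD t (i : Int) ' ' ≠ PySem.List.pyGetD t (-(i : Int) - 1) ' ' then
      false
    else
      FelLoop t (i + 1)
  else true
termination_by t.length / 2 - i

def Felindrom (s1 : String) (s2 : String) : Bool :=
  let temp := s1.toList ++ s2.toList
  FelLoop temp 0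

-- ===== PORT B =====
def Felindrom_alt (s1 : String) (s2 : String) : Bool :=
  let t := s1.toList ++ s2.toList
  t == t.reverse

-- ===== PRECONDITION & SPEC =====
def Spec_Felindrom (s1 : String) (s2 : String) (out : Bool) : Prop := out = Felindrom_alt s1 s2
instance (s1 : String) (s2 : String) (out : Bool) : Decidable (Spec_Felindrom s1 s2 out) := by unfold Spec_Felindrom; infer_instance

-- ===== CLAIM (what is proved, stated in full; the proofs are below) =====
def Claim_equal_Felindrom : Prop := ∀ (s1 : String) (s2 : String), Dom_Felindrom s1 s2 → Spec_Felindrom s1 s2 (Felindrom s1 s2)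

-- ===== LEMMAS AND PROOFS =====

theorem FelLoop_iff (t : List Char) (i : Nat) :
    FelLoop t i = true ↔ ∀ j, i ≤ j → (hj : j < t.length / 2) →
      t[j]'(by omega) = t[t.length - 1 - j]'(by omega) := by
  induction i using FelLoop.induct t with
  | case1 i h hne =>
      rw [FelLoop]
      simp only [dif_pos h, if_pos hne]
      constructor
      · intro hc; exact absurd hc (by simp)
      · intro hall
        exact absurd (hall i le_rfl h) (by
          have hi : (0:Int) ≤ (i:Int) := Int.natCast_nonneg i
          have h1 : PySem.List.pyGetD t (i : Int) ' ' = t[i]'(by omega) := by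
            rw [PySem.List.pyGetD_eq_getElem t ' ' hi (by omega)]
            simp
          have h2 : PySem.List.pyGetD t (-(i : Int) - 1) ' ' = t[t.length - (i+1)]'(by omega) := by
            have : (-(i : Int) - 1) = -(((i+1 : Nat) : Int)) := by push_cast; ring
            rw [this, PySem.List.pyGetD_neg_natCast t _ ' ' (by omega) (by omega)]
          rw [h1, h2] at hne
          have : t.length - (i+1) = t.length - 1 - i := by omega
          simp_all)
  | case2 i h hne ih =>
      rw [FelLoop]
      simp only [dif_pos h, if_neg hne, ih]
      rw [not_ne_iff] at hne
      constructor
      · intro hall j hij hj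
        rcases Nat.eq_or_lt_of_le hij with rfl | hlt
        · have hi : (0:Int) ≤ (i:Int) := Int.natCast_nonneg i
          have h1 : PySem.List.pyGetD t (i : Int) ' ' = t[i]'(by omega) := by
            rw [PySem.List.pyGetD_eq_getElem t ' ' hi (by omega)]
            simp
          have h2 : PySem.List.pyGetD t (-(i : Int) - 1) ' ' = t[t.length - (i+1)]'(by omega) := by
            have : (-(i : Int) - 1) = -(((i+1 : Nat) : Int)) := by push_cast; ring
            rw [this, PySem.List.pyGetD_neg_natCast t _ ' ' (by omega) (by omega)]
          rw [h1, h2] at hne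
          simp only [show t.length - (i+1) = t.length - 1 - i from by omega] at hne
          exact hne
        · exact hall j hlt hj
      · intro hall j hij hj; exact hall j (by omega) hj
  | case3 i h =>
      rw [FelLoop]
      simp only [dif_neg h]
      constructor
      · intro _ j hij hj; omega
      · intro _; simp

theorem pal_iff (t : List Char) :
    (t = t.reverse) ↔ ∀ j, (hj : j < t.length / 2) →
      t[j]'(by omega) = t[t.length - 1 - j]'(by omega) := by
  constructor
  · intro heq j hj
    rw [← List.getElem_reverse]
    exact getElem_congr_coll heq
  · intro hall
    apply List.ext_getElem (by simp)
    intro k hk hk'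
    rw [List.getElem_reverse]
    by_cases h1 : k < t.length / 2
    · exact hall k h1
    · by_cases h2 : t.length - 1 - k < t.length / 2
      · have := hall (t.length - 1 - k) h2
        simp only [show t.length - 1 - (t.length - 1 - k) = k from by omega] at this
        exact this.symm
      · have hkk : t.length - 1 - k = k := by omega
        simp only [hkk]

theorem Felindrom_eq (s1 s2 : String) : Felindrom s1 s2 = Felindrom_alt s1 s2 := by
  unfold Felindrom Felindrom_alt
  simp only []
  set t := s1.toList ++ s2.toList
  rcases hb : (t == t.reverse) with _ | _
  · have : ¬ (t = t.reverse) := by simpa using hb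
    rw [pal_iff] at this
    by_contra hc
    simp only [Bool.not_eq_false] at hc
    rw [FelLoop_iff] at hc
    exact this (fun j hj => hc j (Nat.zero_le _) hj)
  · have : t = t.reverse := by simpa using hb
    rw [pal_iff] at this
    rw [FelLoop_iff]
    intro j _ hj; exact this j hj

-- ===== VERDICT (by name: the statement is the Claim_ definition above) =====
theorem Felindrom_spec : Claim_equal_Felindrom := by
  intro s1 s2 _
  unfold Spec_Felindrom
  exact Felindrom_eq s1 s2
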